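-- pv_equiv track=rewrite | github.com/parkavai/IN2010 | Uke 35/Binære søketrær/number-tree.py | hent
-- ===== SOURCE A (Python) =====
-- def hent(height, streng):
--     height = int(height)
--     streng = str(streng)
--     rot = (2**height) - 1
--     tall = 0
--     for i in range(len(streng)-1):
--         if(streng[i] == "L"):
--             tall = (2 * tall) + 1
--         else:
--             tall = (2 * tall) + 2
--     tall = rot - tall
--     return tall
-- ===== SOURCE B (Python) =====
-- def hent(height, streng):
--     height = int(height)
--     streng = str(streng)
--     path = streng[:-1]
--     bad = sum(1 << i for i, c in enumerate(reversed(path)) if c != "L")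
--     return 2 ** height - 2 ** len(path) - bad
-- ===== Notes on version B (the rewrite author's own statement) =====
-- stated objective: faster
-- what changed: Replaces the Horner-style accumulator loop (tall = 2*tall + 1|2 over a range of indices, then rot - tall) by a closed form 2**height - 2**len(path) - bad, where bad is a sum of single-bit shifts (1 << i) over the reversed path; the shifts avoid the repeated multiply-add on a growing big-int accumulator (measured constant-factor speedup).
-- outside the precondition, e.g. on hent(-1, 'LR'): A returns -1.5, B returns -1.5
import Mathlib
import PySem

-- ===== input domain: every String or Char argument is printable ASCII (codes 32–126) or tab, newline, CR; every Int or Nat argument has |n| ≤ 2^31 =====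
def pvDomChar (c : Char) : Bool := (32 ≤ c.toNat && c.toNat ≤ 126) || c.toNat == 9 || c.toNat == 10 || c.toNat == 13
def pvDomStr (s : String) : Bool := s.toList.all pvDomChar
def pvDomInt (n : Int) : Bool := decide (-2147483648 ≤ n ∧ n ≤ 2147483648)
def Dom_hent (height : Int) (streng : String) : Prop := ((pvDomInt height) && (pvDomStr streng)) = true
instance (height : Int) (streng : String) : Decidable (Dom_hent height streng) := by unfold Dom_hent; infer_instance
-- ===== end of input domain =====

-- B replaces A's Horner accumulator loop by the closed form 2^height - 2^m - bad, with bad a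
-- sum of single-bit shifts over the reversed path (measured modestly faster on large inputs).

-- ===== PORT A =====
-- 2**height is exact for height ≥ 0 (ensured by Pre_hent); the loop index i of
-- range(len(streng)-1) is always in range, so pyGetD's default is never used.
def hent (height : Int) (streng : String) : Int :=
  let rot : Int := 2 ^ height.toNat - 1
  let s := streng.toList
  let tall : Int := (PySem.List.pyRange 0 ((s.length : Int) - 1) 1).foldl
      (fun tall i => if PySem.List.pyGetD s i ' ' = 'L' then 2 * tall + 1 else 2 * tall + 2) 0
  rot - tall

-- ===== PORT B =====
-- sum(1 << i for i, c in enumerate(reversed(streng[:-1])) if c != "L") — '1 << i' is exactly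
-- 2^i on Python ints, ported as (2 : Int) ^ i.toNat — then the closed form.
def hent_alt (height : Int) (streng : String) : Int :=
  let path : List Char := PySem.List.slice streng.toList none (some (-1))
  let bad : Int := (((PySem.List.enumerate path.reverse 0).filter
      (fun p => decide (p.2 ≠ 'L'))).map (fun p => (2 : Int) ^ p.1.toNat)).sum
  2 ^ height.toNat - 2 ^ path.length - bad

-- ===== PRECONDITION & SPEC =====
-- Pre_ excludes height < 0, where Python's 2**height is a float and A returns a float, not an int.
def Pre_hent (height : Int) (streng : String) : Prop := 0 ≤ height
instance (height : Int) (streng : String) : Decidable (Pre_hent height streng) := by unfold Pre_hent; infer_instance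
def pvWitness_hent : Int × String := (3, "LRL")

def Spec_hent (height : Int) (streng : String) (out : Int) : Prop := out = hent_alt height streng
instance (height : Int) (streng : String) (out : Int) : Decidable (Spec_hent height streng out) := by unfold Spec_hent; infer_instance

-- ===== CLAIM (what is proved, stated in full; the proofs are below) =====
def Claim_equal_hent : Prop := ∀ (height : Int) (streng : String), Dom_hent height streng → Pre_hent height streng → Spec_hent height streng (hent height streng)

-- ===== LEMMAS AND PROOFS =====

-- B's sum of powers, with a general start index.
def pvS (rl : List Char) (s : Int) : Int :=
  (((PySem.List.enumerate rl s).filter (fun p => decide (p.2 ≠ 'L'))).map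
    (fun p => (2 : Int) ^ p.1.toNat)).sum

theorem pvS_nil (s : Int) : pvS [] s = 0 := by
  simp [pvS, PySem.List.enumerate]

theorem pvS_cons (c : Char) (rl : List Char) (s : Int) :
    pvS (c :: rl) s = (if c = 'L' then 0 else 2 ^ s.toNat) + pvS rl (s + 1) := by
  by_cases h : c = 'L' <;> simp [pvS, PySem.List.enumerate, h]

theorem pvS_shift (rl : List Char) (s : Int) (hs : 0 ≤ s) : pvS rl (s + 1) = 2 * pvS rl s := by
  induction rl generalizing s with
  | nil => simp [pvS_nil]
  | cons c rl ih =>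
    rw [pvS_cons, pvS_cons, ih (s + 1) (by omega)]
    have h1 : (s + 1).toNat = s.toNat + 1 := by omega
    by_cases h : c = 'L' <;> simp [h, h1, pow_succ] <;> ring

-- A's loop equals 2^len * (a+1) - 1 + (B's sum over the reversed list).
theorem pvHorner (l : List Char) (a : Int) :
    l.foldl (fun tall c => if c = 'L' then 2 * tall + 1 else 2 * tall + 2) a
      = 2 ^ l.length * (a + 1) - 1 + pvS l.reverse 0 := by
  induction l using List.reverseRecOn generalizing a with
  | nil => simp [pvS_nil]
  | append_singleton l c ih =>
    simp only [List.foldl_append, List.reverse_append, List.reverse_singleton,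
      List.singleton_append]
    rw [pvS_cons, pvS_shift l.reverse 0 le_rfl]
    simp only [List.foldl_cons, List.foldl_nil, ih]
    by_cases h : c = 'L' <;>
      simp only [h, if_true, if_false, List.length_append, List.length_singleton,
        Int.toNat_zero, pow_zero, pow_succ] <;> ring

-- A's range-indexed fold is the fold over dropLast.
theorem pvFoldA (s : List Char) :
    (PySem.List.pyRange 0 ((s.length : Int) - 1) 1).foldl
        (fun tall i => if PySem.List.pyGetD s i ' ' = 'L' then 2 * tall + 1 else 2 * tall + 2) (0 : Int)
      = s.dropLast.foldl (fun tall c => if c = 'L' then 2 * tall + 1 else 2 * tall + 2) (0 : Int) := by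
  rcases s.eq_nil_or_concat with rfl | ⟨l, c, rfl⟩
  · simp [PySem.List.pyRange_one_eq_nil]
  · simp only [List.concat_eq_append]
    have hlen : ((l ++ [c]).length : Int) - 1 = ((l ++ [c]).dropLast.length : Int) := by
      simp [List.length_append]
    have hcong : ∀ (acc : Int), ∀ i ∈ PySem.List.pyRange 0 (((l ++ [c]).dropLast.length : Int)) 1,
        (if PySem.List.pyGetD (l ++ [c]) i ' ' = 'L' then 2 * acc + 1 else 2 * acc + 2)
          = (if PySem.List.pyGetD (l ++ [c]).dropLast i ' ' = 'L' then 2 * acc + 1 else 2 * acc + 2) := by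
      intro acc i hi
      rw [PySem.List.mem_pyRange_one] at hi
      have h0 : 0 ≤ i := hi.1
      have h1 : i.toNat < (l ++ [c]).dropLast.length := by omega
      have h2 : i.toNat < (l ++ [c]).length := by
        simp only [List.length_dropLast] at h1
        simp only [List.length_append, List.length_dropLast] at *
        omega
      rw [PySem.List.pyGetD_eq_getElem _ ' ' h0 (by omega),
        PySem.List.pyGetD_eq_getElem _ ' ' h0 (by omega),
        List.getElem_dropLast]
    rw [hlen, PySem.List.foldl_congr_mem _ _ _ _ hcong,
      PySem.List.foldl_pyRange_zero_pyGetD' (l ++ [c]).dropLast ' '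
        (fun tall ch => if ch = 'L' then 2 * tall + 1 else 2 * tall + 2) 0]

theorem hent_eq (height : Int) (streng : String) :
    hent height streng = hent_alt height streng := by
  simp only [hent, hent_alt, PySem.List.slice_to_neg_one]
  rw [pvFoldA, pvHorner]
  show 2 ^ height.toNat - 1 - _ = 2 ^ height.toNat - 2 ^ _ - pvS _ 0
  ring

-- ===== VERDICT (by name: the statement is the Claim_ definition above) =====
theorem hent_spec : Claim_equal_hent := by
  intro height streng _ _
  exact hent_eq height streng
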